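-- pv_equiv track=rewrite | github.com/Zafer-Uysal/Project_Euler_Solutions | Python/Project_Euler_S24.py | per
-- ===== SOURCE A (Python) =====
-- def per(per_list):
--     if len(per_list) == 1:
--         return [per_list]
--
--     result = []
--     for i in range(len(per_list)):
--         select = per_list[i]
--         left = per_list[:i] + per_list[i+1:]
--
--         for j in per(left):
--             result.append([select] + j)
--             if len(result) == 1000000:
--                 return result
--
--     return result
-- ===== SOURCE B (Python) =====
-- def per(per_list):
--     # Lehmer-code unranking: build the k-th permutation directly from its rank,
--     # for the first min(n!, 1000000) ranks, instead of recursive enumeration.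
--     n = len(per_list)
--     fact = [1] * (n + 1)
--     for k in range(1, n + 1):
--         fact[k] = fact[k - 1] * k
--     count = min(fact[n], 1000000)
--     result = []
--     for rank in range(count):
--         items = list(per_list)
--         perm = []
--         r = rank
--         for m in range(n, 0, -1):
--             i, r = divmod(r, fact[m - 1])
--             perm.append(items.pop(i))
--         result.append(perm)
--     return result
-- ===== Notes on version B (the rewrite author's own statement) =====
-- stated objective: alternative
-- what changed: B replaces A's capped recursive enumeration (select each head, recurse, append with an early-return cap threaded through every level) by direct Lehmer-code unranking: it decodes each rank 0..min(n!,1000000)-1 into its permutation with factorial divmods and pops, with no recursion and no cap bookkeeping.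
-- outside the precondition, e.g. on per([]): A returns [], B returns [[]]
import Mathlib
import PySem

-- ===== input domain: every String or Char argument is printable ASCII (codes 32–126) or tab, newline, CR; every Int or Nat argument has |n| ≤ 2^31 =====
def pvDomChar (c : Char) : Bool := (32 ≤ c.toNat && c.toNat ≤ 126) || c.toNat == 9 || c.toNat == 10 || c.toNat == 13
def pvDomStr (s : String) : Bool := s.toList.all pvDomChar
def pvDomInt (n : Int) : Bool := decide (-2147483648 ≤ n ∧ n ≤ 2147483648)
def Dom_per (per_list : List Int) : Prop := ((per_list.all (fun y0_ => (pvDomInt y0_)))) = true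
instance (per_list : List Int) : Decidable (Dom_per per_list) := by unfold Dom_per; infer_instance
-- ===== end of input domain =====

-- B re-implements A's capped recursive permutation enumeration by direct Lehmer-code
-- unranking of the first min(n!, 1000000) ranks (an alternative algorithm, not claimed faster).

-- ===== PORT A =====
-- inner loop: 'for j in per(left): result.append([select] + j); if len(result) == 1000000: return result'
-- second component signals the early return
def perInner (select : Int) (js : List (List Int)) (result : List (List Int)) :
    List (List Int) × Bool :=
  match js with
  | [] => (result, false)
  | j :: rest =>
    let result' := result ++ [select :: j]
    if result'.length = 1000000 then (result', true)
    else perInner select rest result'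

mutual
def per (per_list : List Int) : List (List Int) :=
  if per_list.length = 1 then [per_list]
  else perOuter per_list 0 []
termination_by (per_list.length, per_list.length + 1)
decreasing_by apply Prod.Lex.right; omega

-- outer loop: 'for i in range(len(per_list)): …'
def perOuter (l : List Int) (i : Nat) (result : List (List Int)) : List (List Int) :=
  if h : i < l.length then
    let select := l.getD i 0                    -- per_list[i]; i < len l, so exact
    let left := l.take i ++ l.drop (i + 1)      -- per_list[:i] + per_list[i+1:]
    let p := perInner select (per left) result
    if p.2 then p.1 else perOuter l (i + 1) p.1
  else result
termination_by (l.length, l.length - i)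
decreasing_by
  · apply Prod.Lex.left
    simp only [List.length_append, List.length_take, List.length_drop]
    omega
  · apply Prod.Lex.right; omega
end

-- ===== PORT B =====
-- fact[k] = fact[k-1] * k
def factB : Nat → Nat
  | 0 => 1
  | n + 1 => factB n * (n + 1)

-- the inner loop of Source B: 'for m in range(n, 0, -1): i, r = divmod(r, fact[m-1]); perm.append(items.pop(i))'
-- (structural recursion on the shrinking 'items'); for rank < len(items)! the pop index is always in range,
-- the 'else []' branch is only a totality guard (Python's pop would raise IndexError there)
def decodeB : List Int → Nat → List Int
  | [], _ => []
  | a :: rest, r =>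
    if hidx : r / factB rest.length < (a :: rest).length then
      (a :: rest).getD (r / factB rest.length) 0 ::
        decodeB ((a :: rest).eraseIdx (r / factB rest.length)) (r % factB rest.length)
    else []
termination_by items _ => items.length
decreasing_by simp only [List.length_eraseIdx, List.length_cons] at hidx ⊢; split <;> omega

def per_alt (per_list : List Int) : List (List Int) :=
  (List.range (min (factB per_list.length) 1000000)).map (fun rank => decodeB per_list rank)

-- ===== PRECONDITION & SPEC =====
-- Pre_ excludes only the empty list: the 'zero permutations vs one empty permutation' corner is
-- anybody's choice — A returns [] there while B's unranking naturally returns [[]].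
def Pre_per (per_list : List Int) : Prop := per_list ≠ []
instance (per_list : List Int) : Decidable (Pre_per per_list) := by unfold Pre_per; infer_instance
def pvWitness_per : List Int := ([1, 2])

def Spec_per (per_list : List Int) (out : List (List Int)) : Prop := out = per_alt per_list
instance (per_list : List Int) (out : List (List Int)) : Decidable (Spec_per per_list out) := by unfold Spec_per; infer_instance

-- ===== CLAIM (what is proved, stated in full; the proofs are below) =====
def Claim_equal_per : Prop := ∀ (per_list : List Int), Dom_per per_list → Pre_per per_list → Spec_per per_list (per per_list)

-- ===== LEMMAS AND PROOFS =====

theorem factB_pos (n : Nat) : 0 < factB n := by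
  induction n with
  | zero => simp [factB]
  | succ n ih => simp [factB]; positivity

-- the full (uncapped) enumeration, as B produces it
def permsRec (l : List Int) : List (List Int) :=
  (List.range (factB l.length)).map (decodeB l)

theorem decodeB_step (a : Int) (rest : List Int) (r : Nat)
    (hr : r < factB (rest.length + 1)) :
    decodeB (a :: rest) r =
      (a :: rest).getD (r / factB rest.length) 0 ::
        decodeB ((a :: rest).eraseIdx (r / factB rest.length)) (r % factB rest.length) := by
  have hf := factB_pos rest.length
  have hi : r / factB rest.length < rest.length + 1 := by
    rw [Nat.div_lt_iff_lt_mul hf]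
    calc r < factB (rest.length + 1) := hr
    _ = (rest.length + 1) * factB rest.length := by rw [factB]; ring
  rw [decodeB.eq_def]
  simp only [List.length_cons]
  rw [dif_pos (by simpa using hi)]

theorem range_mul_flatMap (k f : Nat) :
    List.range (k * f) =
      (List.range k).flatMap (fun i => (List.range f).map (fun j => i * f + j)) := by
  induction k with
  | zero => simp
  | succ k ih =>
    rw [Nat.succ_mul, List.range_add, List.range_succ, List.flatMap_append, ← ih]
    simp

theorem perms_split (l : List Int) (hl : l ≠ []) :
    permsRec l =
      (List.range l.length).flatMap
        (fun i => (permsRec (l.eraseIdx i)).map (fun rest => l.getD i 0 :: rest)) := by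
  obtain ⟨a, rest, rfl⟩ : ∃ a t, l = a :: t := by
    cases l with
    | nil => exact absurd rfl hl
    | cons a t => exact ⟨a, t, rfl⟩
  have hf := factB_pos rest.length
  have hfact : factB (a :: rest).length = (rest.length + 1) * factB rest.length := by
    simp only [List.length_cons]
    rw [factB]; ring
  unfold permsRec
  rw [hfact, range_mul_flatMap, List.map_flatMap]
  apply List.flatMap_congr
  intro i hi
  have hi' : i < rest.length + 1 := by simpa using List.mem_range.mp hi
  have hlen : ((a :: rest).eraseIdx i).length = rest.length := by
    rw [List.length_eraseIdx]
    simp only [List.length_cons]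
    rw [if_pos (by omega)]
    omega
  rw [hlen, List.map_map, List.map_map]
  apply List.map_congr_left
  intro j hj
  have hj' : j < factB rest.length := List.mem_range.mp hj
  have hr : i * factB rest.length + j < factB (rest.length + 1) := by
    have h1 : i * factB rest.length + j < (i + 1) * factB rest.length := by
      rw [Nat.succ_mul]; omega
    calc i * factB rest.length + j < (i + 1) * factB rest.length := h1
    _ ≤ (rest.length + 1) * factB rest.length := Nat.mul_le_mul_right _ (by omega)
    _ = factB (rest.length + 1) := by rw [factB]; ring
  have hdiv : (i * factB rest.length + j) / factB rest.length = i := by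
    rw [Nat.add_comm, Nat.add_mul_div_right _ _ hf, Nat.div_eq_of_lt hj']
    omega
  have hmod : (i * factB rest.length + j) % factB rest.length = j := by
    rw [Nat.add_comm, Nat.add_mul_mod_self_right]
    exact Nat.mod_eq_of_lt hj'
  have hstep := decodeB_step a rest (i * factB rest.length + j) hr
  simp only [Function.comp_def]
  rw [hstep, hdiv, hmod]

-- ===== A-side: the capped enumeration is 'take 1000000' of the full one =====

theorem perInner_eq (sel : Int) (js : List (List Int)) (result : List (List Int))
    (h : result.length < 1000000) :
    perInner sel js result =
      ((result ++ js.map (sel :: ·)).take 1000000,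
        decide (1000000 ≤ result.length + js.length)) := by
  induction js generalizing result with
  | nil =>
    simp only [perInner, List.map_nil, List.append_nil, List.length_nil, Nat.add_zero]
    rw [List.take_of_length_le (Nat.le_of_lt h)]
    simp only [Prod.mk.injEq, true_and]
    symm
    simp only [decide_eq_false_iff_not]
    omega
  | cons j rest ih =>
    have hlen1 : (result ++ [sel :: j]).length = result.length + 1 := by simp
    by_cases hc : (result ++ [sel :: j]).length = 1000000
    · have hu : perInner sel (j :: rest) result = (result ++ [sel :: j], true) := by
        rw [perInner]
        simp [hc]
      rw [hu]
      have hmap : result ++ (j :: rest).map (sel :: ·)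
          = (result ++ [sel :: j]) ++ rest.map (sel :: ·) := by simp
      rw [hmap, List.take_append_of_le_length (le_of_eq hc.symm),
        List.take_of_length_le (le_of_eq hc)]
      simp only [Prod.mk.injEq, true_and, List.length_cons]
      symm
      simp only [decide_eq_true_eq]
      omega
    · have hc9 : ¬ result.length = 999999 := by rw [hlen1] at hc; omega
      have hu : perInner sel (j :: rest) result = perInner sel rest (result ++ [sel :: j]) := by
        rw [perInner]
        simp [hc9]
      rw [hu, ih _ (by omega)]
      have hmap : (result ++ [sel :: j]) ++ rest.map (sel :: ·)
          = result ++ (j :: rest).map (sel :: ·) := by simp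
      rw [hmap, hlen1]
      simp only [Prod.mk.injEq, true_and, List.length_cons]
      simp only [decide_eq_decide]
      omega



-- the still-to-be-produced tail of the stream, starting at outer index i
def streamFrom (l : List Int) (i : Nat) : List (List Int) :=
  (List.range (l.length - i)).flatMap
    (fun k => (permsRec (l.eraseIdx (i + k))).map (fun rest => l.getD (i + k) 0 :: rest))

theorem streamFrom_step (l : List Int) (i : Nat) (h : i < l.length) :
    streamFrom l i =
      (permsRec (l.eraseIdx i)).map (fun rest => l.getD i 0 :: rest) ++ streamFrom l (i + 1) := by
  unfold streamFrom
  have h1 : l.length - i = (l.length - (i + 1)) + 1 := by omega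
  rw [h1, List.range_succ_eq_map, List.flatMap_cons, List.flatMap_map]
  simp only [Nat.add_zero]
  congr 1
  apply List.flatMap_congr
  intro k _
  have h2 : i + Nat.succ k = i + 1 + k := by omega
  rw [h2]

theorem take_append_take (c : Nat) (a b : List (List Int)) :
    (a ++ b.take c).take c = (a ++ b).take c := by
  rw [List.take_append, List.take_append, List.take_take]
  congr 2
  omega

theorem perOuter_eq (l : List Int) (hl2 : 2 ≤ l.length)
    (hrec : ∀ m : List Int, m.length < l.length → m ≠ [] → per m = (permsRec m).take 1000000) :
    ∀ d i result, l.length - i ≤ d → result.length < 1000000 →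
      perOuter l i result = (result ++ streamFrom l i).take 1000000 := by
  intro d
  induction d with
  | zero =>
    intro i result hd hres
    have hi : ¬ i < l.length := by omega
    rw [perOuter, dif_neg hi]
    unfold streamFrom
    rw [show l.length - i = 0 from by omega]
    simp [List.take_of_length_le (Nat.le_of_lt hres)]
  | succ d ih =>
    intro i result hd hres
    by_cases hi : i < l.length
    · rw [perOuter, dif_pos hi]
      have hleft : l.take i ++ l.drop (i + 1) = l.eraseIdx i :=
        (List.eraseIdx_eq_take_drop_succ l i).symm
      have hlenleft : (l.eraseIdx i).length = l.length - 1 := by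
        rw [List.length_eraseIdx, if_pos hi]
      have hne : l.eraseIdx i ≠ [] := by
        intro hcon
        rw [hcon] at hlenleft
        simp at hlenleft
        omega
      have hper : per (l.take i ++ l.drop (i + 1)) = (permsRec (l.eraseIdx i)).take 1000000 := by
        rw [hleft]
        exact hrec (l.eraseIdx i) (by rw [hlenleft]; omega) hne
      simp only [hper]
      rw [perInner_eq _ _ _ hres]
      rw [List.map_take, take_append_take]
      simp only [List.length_take]
      by_cases hflag : 1000000 ≤ result.length + min 1000000 ((permsRec (l.eraseIdx i)).map ((l.getD i 0) :: ·)).length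
      · rw [if_pos (by simpa using hflag)]
        have hlen : 1000000 ≤ (result ++ (permsRec (l.eraseIdx i)).map ((l.getD i 0) :: ·)).length := by
          rw [List.length_append]
          have := Nat.min_le_right 1000000 ((permsRec (l.eraseIdx i)).map ((l.getD i 0) :: ·)).length
          omega
        rw [streamFrom_step l i hi, ← List.append_assoc,
          List.take_append_of_le_length hlen]
      · rw [if_neg (by simpa using hflag)]
        rw [Nat.not_le] at hflag
        set xs := (permsRec (l.eraseIdx i)).map ((l.getD i 0) :: ·) with hxs
        have hxlt : xs.length < 1000000 := by
          rcases Nat.lt_or_ge xs.length 1000000 with h' | h'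
          · exact h'
          · exfalso
            rw [min_eq_left h'] at hflag
            omega
        have htk : (result ++ xs).take 1000000 = result ++ xs := by
          apply List.take_of_length_le
          rw [List.length_append]
          rw [min_eq_right (le_of_lt hxlt)] at hflag
          omega
        rw [htk, ih (i + 1) (result ++ xs) (by omega)
            (by rw [List.length_append]; rw [min_eq_right (le_of_lt hxlt)] at hflag; omega),
          streamFrom_step l i hi, ← List.append_assoc]
    · rw [perOuter, dif_neg hi]
      unfold streamFrom
      rw [show l.length - i = 0 from by omega]
      simp [List.take_of_length_le (Nat.le_of_lt hres)]

theorem per_eq_take : ∀ (n : Nat) (l : List Int), l.length = n → l ≠ [] →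
    per l = (permsRec l).take 1000000 := by
  intro n
  induction n using Nat.strong_induction_on with
  | _ n ih =>
  intro l hn hl
  by_cases h1 : l.length = 1
  · obtain ⟨a, rfl⟩ : ∃ a, l = [a] := by
      cases l with
      | nil => exact absurd rfl hl
      | cons a t =>
        cases t with
        | nil => exact ⟨a, rfl⟩
        | cons b u => simp at h1
    rw [per]
    simp only [List.length_cons, List.length_nil]
    unfold permsRec
    norm_num [factB]
    rw [decodeB.eq_def]
    norm_num [factB]
    rw [decodeB.eq_def]
  · have h2 : 2 ≤ l.length := by
      cases l with
      | nil => exact absurd rfl hl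
      | cons a t =>
        cases t with
        | nil => exact absurd rfl h1
        | cons b u => simp only [List.length_cons]; omega
    rw [per, if_neg h1]
    have hrec : ∀ m : List Int, m.length < l.length → m ≠ [] →
        per m = (permsRec m).take 1000000 := by
      intro m hm hmne
      have hmn : m.length < n := hn ▸ hm
      exact ih m.length hmn m rfl hmne
    rw [perOuter_eq l h2 hrec l.length 0 [] (by omega) (by simp)]
    simp only [List.nil_append]
    congr 1
    rw [perms_split l hl]
    unfold streamFrom
    simp

-- ===== VERDICT (by name: the statement is the Claim_ definition above) =====
theorem per_spec : Claim_equal_per := by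
  intro l _ hpre
  unfold Spec_per
  rw [per_eq_take l.length l rfl hpre]
  unfold permsRec per_alt
  rw [← List.map_take, List.take_range, Nat.min_comm]
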